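-- pv_equiv track=rewrite | github.com/yanheven/learn-python | learn-os.py | query_some
-- ===== SOURCE A (Python) =====
-- import copy
--
-- def query_some(q,l):
--     count=0
--     for i in l:
--         flag_all=True
--         flag_in=False
--         new_l=copy.deepcopy(i)
--         for j in q:
--             lenth=len(new_l)
--             x=0
--             if lenth==0:
--                 flag_all=False
--             while x<lenth:
--                 y=new_l[x]
--                 if j!=y and y>j:
--                     flag_all=False
--                     break
--                 elif j==y:
--                     flag_in=True
--                     new_l.remove(y)
--                     lenth-=1
--                     break
--                 else:
--                     new_l.remove(y)
--                     lenth-=1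
--         if flag_in and not flag_all:
--             count+=1
--     return count
-- ===== SOURCE B (Python) =====
-- def query_some(q, l):
--     count = 0
--     for row in l:
--         n = len(row)
--         k = 0
--         covered = True
--         hit = False
--         for j in q:
--             if k == n:
--                 covered = False
--                 continue
--             while k < n:
--                 y = row[k]
--                 if y > j:
--                     covered = False
--                     break
--                 k += 1
--                 if y == j:
--                     hit = True
--                     break
--         if hit and not covered:
--             count += 1
--     return count
-- ===== Notes on version B (the rewrite author's own statement) =====
-- stated objective: faster
-- what changed: Per row, B scans the original list with an advancing index and a two-pointer merge against q, instead of deep-copying each row and repeatedly calling list.remove on its front.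
import Mathlib
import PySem

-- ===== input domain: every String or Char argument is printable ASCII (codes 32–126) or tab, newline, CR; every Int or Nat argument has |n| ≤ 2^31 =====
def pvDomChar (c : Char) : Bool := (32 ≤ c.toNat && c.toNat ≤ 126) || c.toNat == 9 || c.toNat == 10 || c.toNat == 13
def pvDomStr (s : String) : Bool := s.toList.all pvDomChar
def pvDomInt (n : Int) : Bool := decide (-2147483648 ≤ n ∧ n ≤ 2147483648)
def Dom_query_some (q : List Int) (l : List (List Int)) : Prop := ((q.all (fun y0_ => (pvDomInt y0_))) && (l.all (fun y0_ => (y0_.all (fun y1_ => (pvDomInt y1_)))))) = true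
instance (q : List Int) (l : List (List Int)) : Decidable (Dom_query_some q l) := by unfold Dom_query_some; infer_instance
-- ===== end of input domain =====

-- B replaces A's deepcopy + repeated list.remove front-consumption with an index two-pointer scan
-- over the unmodified row: objective 'faster' (asymptotic, measured).

-- ===== PORT A =====
-- A's while loop: x is never incremented, so x = 0 throughout; new_l[x] is the head of new_l,
-- and new_l.remove(y) with y = new_l[0] removes exactly the head. We model new_l as the list
-- and the loop as structural recursion on it (lenth = new_l.length, decremented with each remove).
def pvWhileA (j : Int) : List Int → Bool → Bool → List Int × Bool × Bool
  | [], fa, fi => ([], fa, fi)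
  | y :: rest, fa, fi =>
      if j ≠ y ∧ y > j then (y :: rest, false, fi)
      else if j = y then (rest, fa, true)
      else pvWhileA j rest fa fi

-- the body of 'for j in q' over the state (new_l, flag_all, flag_in)
def pvStepA (st : List Int × Bool × Bool) (j : Int) : List Int × Bool × Bool :=
  let fa := if st.1.length = 0 then false else st.2.1
  pvWhileA j st.1 fa st.2.2

def query_some (q : List Int) (l : List (List Int)) : Int :=
  l.foldl (fun count i =>
    -- new_l = copy.deepcopy(i) (pure values: the copy is i itself)
    let s := q.foldl pvStepA (i, true, false)
    if s.2.2 ∧ ¬ s.2.1 then count + 1 else count) 0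

-- ===== PORT B =====
-- B's inner while: advance index k over the fixed row
def pvWhileB (row : List Int) (j : Int) (k : Nat) (cov hit : Bool) : Nat × Bool × Bool :=
  if h : k < row.length then
    let y := row[k]
    if y > j then (k, false, hit)
    else if y = j then (k + 1, cov, true)
    else pvWhileB row j (k + 1) cov hit
  else (k, cov, hit)
termination_by row.length - k

def pvStepB (row : List Int) (st : Nat × Bool × Bool) (j : Int) : Nat × Bool × Bool :=
  if st.1 = row.length then (st.1, false, st.2.2)
  else pvWhileB row j st.1 st.2.1 st.2.2

def query_some_alt (q : List Int) (l : List (List Int)) : Int :=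
  l.foldl (fun count row =>
    let s := q.foldl (pvStepB row) (0, true, false)
    if s.2.2 ∧ ¬ s.2.1 then count + 1 else count) 0

-- ===== PRECONDITION & SPEC =====
def Spec_query_some (q : List Int) (l : List (List Int)) (out : Int) : Prop := out = query_some_alt q l
instance (q : List Int) (l : List (List Int)) (out : Int) : Decidable (Spec_query_some q l out) := by unfold Spec_query_some; infer_instance

-- ===== CLAIM (what is proved, stated in full; the proofs are below) =====
def Claim_equal_query_some : Prop := ∀ (q : List Int) (l : List (List Int)), Dom_query_some q l → Spec_query_some q l (query_some q l)

-- ===== LEMMAS AND PROOFS =====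

-- A's while on the suffix row.drop k matches B's while advancing k, and k stays ≤ row.length.
theorem while_agree (row : List Int) (j : Int) (cov hit : Bool) (k : Nat) (hk : k ≤ row.length) :
    pvWhileA j (row.drop k) cov hit =
      ((row.drop (pvWhileB row j k cov hit).1), (pvWhileB row j k cov hit).2) ∧
    (pvWhileB row j k cov hit).1 ≤ row.length := by
  induction k using pvWhileB.induct (row := row) (j := j) with
  | case1 k h y hyj =>
    have hyj' : row[k] > j := hyj
    rw [pvWhileB]
    simp only [dif_pos h]
    rw [if_pos hyj']
    have hd : row.drop k = row[k] :: row.drop (k + 1) := List.drop_eq_getElem_cons h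
    rw [hd, pvWhileA]
    have hc : j ≠ row[k] ∧ row[k] > j := ⟨ne_of_lt hyj', hyj'⟩
    simp [hc, ← hd, hk]
  | case2 k h y hyj hyj2 =>
    have hyj' : ¬ row[k] > j := hyj
    have hyj2' : row[k] = j := hyj2
    rw [pvWhileB]
    simp only [dif_pos h]
    rw [if_neg hyj', if_pos hyj2']
    have hd : row.drop k = row[k] :: row.drop (k + 1) := List.drop_eq_getElem_cons h
    rw [hd, pvWhileA]
    have h1 : ¬ (j ≠ row[k] ∧ row[k] > j) := fun hc => hyj' hc.2
    have h2 : j = row[k] := hyj2'.symm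
    simp [h2, h]
  | case3 k h y hyj hyj2 ih =>
    have hyj' : ¬ row[k] > j := hyj
    have hyj2' : ¬ row[k] = j := hyj2
    rw [pvWhileB]
    simp only [dif_pos h]
    rw [if_neg hyj', if_neg hyj2']
    have hd : row.drop k = row[k] :: row.drop (k + 1) := List.drop_eq_getElem_cons h
    rw [hd, pvWhileA]
    have h1 : ¬ (j ≠ row[k] ∧ row[k] > j) := fun hc => hyj' hc.2
    have h2 : j ≠ row[k] := fun he => hyj2' he.symm
    simp only [if_neg h1, if_neg h2]
    exact ih (by omega)
  | case4 k h =>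
    rw [pvWhileB]
    simp only [dif_neg h]
    have hle : row.length ≤ k := by omega
    rw [List.drop_eq_nil_of_le hle, pvWhileA]
    exact ⟨rfl, hk⟩

theorem step_agree (row : List Int) (j : Int) (k : Nat) (cov hit : Bool) (hk : k ≤ row.length) :
    pvStepA ((row.drop k), cov, hit) j =
      ((row.drop ((pvStepB row) (k, cov, hit) j).1), ((pvStepB row) (k, cov, hit) j).2) ∧
    ((pvStepB row) (k, cov, hit) j).1 ≤ row.length := by
  unfold pvStepA pvStepB
  by_cases hkn : k = row.length
  · subst hkn
    simp [pvWhileA]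
  · have hlt : k < row.length := lt_of_le_of_ne hk hkn
    have hne : (row.drop k).length ≠ 0 := by simp [List.length_drop]; omega
    simp only [if_neg hne, if_neg hkn]
    exact while_agree row j cov hit k hk

theorem fold_agree (q : List Int) (row : List Int) (k : Nat) (cov hit : Bool) (hk : k ≤ row.length) :
    q.foldl pvStepA ((row.drop k), cov, hit) =
      ((row.drop (q.foldl (pvStepB row) (k, cov, hit)).1), (q.foldl (pvStepB row) (k, cov, hit)).2) := by
  induction q generalizing k cov hit with
  | nil => simp
  | cons j q ih =>
    simp only [List.foldl_cons]
    obtain ⟨h1, h2⟩ := step_agree row j k cov hit hk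
    rw [h1]
    exact ih _ _ _ h2

theorem row_agree (q : List Int) (row : List Int) :
    (q.foldl pvStepA (row, true, false)).2 = (q.foldl (pvStepB row) (0, true, false)).2 := by
  have h := fold_agree q row 0 true false (Nat.zero_le _)
  simp only [List.drop_zero] at h
  rw [h]

theorem query_some_eq (q : List Int) (l : List (List Int)) :
    query_some q l = query_some_alt q l := by
  unfold query_some query_some_alt
  induction l using List.reverseRecOn with
  | nil => rfl
  | append_singleton l row ih =>
    simp only [List.foldl_append, List.foldl_cons, List.foldl_nil]
    rw [ih, row_agree q row]

-- ===== VERDICT (by name: the statement is the Claim_ definition above) =====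
theorem query_some_spec : Claim_equal_query_some := by
  intro q l _
  exact query_some_eq q l
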